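-- pv_equiv track=rewrite | github.com/prkhrv/LeetCode-Solutions | tiktok.py | inversion
-- ===== SOURCE A (Python) =====
-- def inversion(arr):
--     delete_duplicate = {}
--     ans = 0
--     for i in range(len(arr)):
--         # cur is the second number
--         cur = arr[i]
--         # filter number have already calculated, because when an number have already shown before cur number, it has already count the numbers after cur number
--         if delete_duplicate.get(cur) == None:
--             # count nums left to the cur number and bigger than cur number
--             count_left = len(set([x for x in arr[:i] if x > cur]))
--             # count nums right to the cur number and smaller than cur number
--             count_right = len(set([x for x in arr[i:] if x < cur]))
--             ans += count_left * count_right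
--             delete_duplicate[cur] = True
--     return ans
-- ===== SOURCE B (Python) =====
-- def inversion(arr):
--     # One pass records each distinct value's first and last occurrence index;
--     # the answer is then computed purely over distinct values via those indices.
--     first = {}
--     last = {}
--     for i, x in enumerate(arr):
--         if x not in first:
--             first[x] = i
--         last[x] = i
--     ans = 0
--     for x, i in first.items():
--         left = sum(1 for u, j in first.items() if j < i and u > x)
--         right = sum(1 for u, j in last.items() if j >= i and u < x)
--         ans += left * right
--     return ans
-- ===== Notes on version B (the rewrite author's own statement) =====
-- stated objective: alternative
-- what changed: Instead of slicing the array and building a fresh set at every first occurrence, B records each distinct value's first and last occurrence index in one pass and computes the sum purely over the distinct values via those indices.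
import Mathlib
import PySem

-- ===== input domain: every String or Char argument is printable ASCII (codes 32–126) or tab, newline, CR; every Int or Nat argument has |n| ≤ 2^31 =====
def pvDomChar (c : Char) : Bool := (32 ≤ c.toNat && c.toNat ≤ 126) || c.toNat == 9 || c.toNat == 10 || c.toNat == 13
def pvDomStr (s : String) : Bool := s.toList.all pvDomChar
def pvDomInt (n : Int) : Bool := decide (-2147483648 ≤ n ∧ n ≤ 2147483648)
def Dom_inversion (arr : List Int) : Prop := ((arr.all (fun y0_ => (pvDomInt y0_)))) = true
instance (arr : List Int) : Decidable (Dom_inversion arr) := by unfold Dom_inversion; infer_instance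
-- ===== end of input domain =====

-- B records each distinct value's first and last occurrence index in one pass and sums over
-- distinct values only, instead of slicing the array and building fresh sets at each step.

-- ===== PORT A =====
def inversion (arr : List Int) : Int :=
  ((PySem.List.pyRange 0 (arr.length : Int) 1).foldl
    (fun (st : PySem.Dict Int Bool × Int) i =>
      let cur := PySem.List.pyGetD arr i 0
      if st.1.get? cur = none then
        let countLeft :=
          (PySem.Set.ofList ((PySem.List.slice arr none (some i)).filter (fun x => decide (cur < x)))).length
        let countRight :=
          (PySem.Set.ofList ((PySem.List.slice arr (some i) none).filter (fun x => decide (x < cur)))).length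
        (st.1.insert cur true, st.2 + (countLeft : Int) * (countRight : Int))
      else st)
    (PySem.Dict.empty, 0)).2

-- ===== PORT B =====
def inversion_alt (arr : List Int) : Int :=
  let fl := (PySem.List.enumerate arr 0).foldl
    (fun (s : PySem.Dict Int Int × PySem.Dict Int Int) p =>
      ((if s.1.contains p.2 then s.1 else s.1.insert p.2 p.1), s.2.insert p.2 p.1))
    (PySem.Dict.empty, PySem.Dict.empty)
  let first := fl.1
  let last := fl.2
  first.items.foldl
    (fun ans q =>
      let left := first.items.countP (fun r => decide (r.2 < q.2) && decide (q.1 < r.1))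
      let right := last.items.countP (fun r => decide (q.2 ≤ r.2) && decide (r.1 < q.1))
      ans + (left : Int) * (right : Int))
    0

-- ===== PRECONDITION & SPEC =====
def Spec_inversion (arr : List Int) (out : Int) : Prop := out = inversion_alt arr
instance (arr : List Int) (out : Int) : Decidable (Spec_inversion arr out) := by unfold Spec_inversion; infer_instance

-- ===== CLAIM (what is proved, stated in full; the proofs are below) =====
def Claim_equal_inversion : Prop := ∀ (arr : List Int), Dom_inversion arr → Spec_inversion arr (inversion arr)

-- ===== LEMMAS AND PROOFS =====
def pvFirsts : PySem.Set Int → List Int → Int → List (Int × Int)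
  | _, [], _ => []
  | seen, x :: t, s =>
      if x ∈ seen then pvFirsts seen t (s + 1)
      else (x, s) :: pvFirsts (PySem.Set.add seen x) t (s + 1)

theorem pvFirsts_bounds : ∀ (l : List Int) (seen : PySem.Set Int) (s : Int),
    ∀ q ∈ pvFirsts seen l s, s ≤ q.2 ∧ q.2 < s + l.length := by
  intro l
  induction l with
  | nil => intro seen s q hq; simp [pvFirsts] at hq
  | cons x t ih =>
    intro seen s q hq
    simp only [pvFirsts] at hq
    simp only [List.length_cons, Nat.cast_add, Nat.cast_one]
    split at hq
    · have := ih seen (s+1) q hq; omega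
    · rcases List.mem_cons.mp hq with h | h
      · subst h; simp
      · have := ih _ (s+1) q h; omega

theorem pvFirsts_append : ∀ (l1 : List Int) (seen : PySem.Set Int) (s : Int) (l2 : List Int),
    pvFirsts seen (l1 ++ l2) s
      = pvFirsts seen l1 s ++ pvFirsts (PySem.Set.update seen l1) l2 (s + l1.length) := by
  intro l1
  induction l1 with
  | nil => intro seen s l2; simp [pvFirsts, PySem.Set.update_nil]
  | cons x t ih =>
    intro seen s l2
    simp only [List.cons_append, pvFirsts, PySem.Set.update_cons]
    by_cases hx : x ∈ seen
    · rw [if_pos hx, if_pos hx, ih, PySem.Set.add_of_mem hx]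
      simp only [List.length_cons]
      push_cast
      ring_nf
    · rw [if_neg hx, if_neg hx, ih]
      simp only [List.length_cons, List.cons_append]
      push_cast
      ring_nf

theorem pvFirsts_map_fst : ∀ (l : List Int) (seen : PySem.Set Int) (s : Int),
    (pvFirsts seen l s).map (·.1) = (PySem.Set.update seen l).drop seen.length := by
  intro l
  induction l with
  | nil => intro seen s; simp [pvFirsts, PySem.Set.update_nil]
  | cons x t ih =>
    intro seen s
    simp only [pvFirsts, PySem.Set.update_cons]
    by_cases hx : x ∈ seen
    · rw [if_pos hx, PySem.Set.add_of_mem hx, ih]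
    · rw [if_neg hx]
      simp only [List.map_cons, ih]
      rw [PySem.Set.add_of_not_mem hx, PySem.Set.update_eq_append_filter]
      conv_lhs => rw [List.drop_left]
      conv_rhs => rw [List.append_assoc, List.drop_left]
      simp
def pvFF (d : PySem.Dict Int Int) (p : Int × Int) : PySem.Dict Int Int :=
  if d.contains p.2 then d else d.insert p.2 p.1
def pvLF (d : PySem.Dict Int Int) (p : Int × Int) : PySem.Dict Int Int :=
  d.insert p.2 p.1

theorem pv_ffold_items : ∀ (l : List Int) (s : Int) (d : PySem.Dict Int Int),
    ((PySem.List.enumerate l s).foldl pvFF d).items = d.items ++ pvFirsts d.keys l s := by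
  intro l
  induction l with
  | nil => intro s d; simp [pvFirsts, PySem.List.enumerate_nil]
  | cons x t ih =>
    intro s d
    rw [PySem.List.enumerate_cons]
    simp only [List.foldl_cons, pvFirsts]
    by_cases hx : x ∈ d.keys
    · have hc : d.contains x = true := (PySem.Dict.contains_iff_mem_keys d x).mpr hx
      rw [if_pos hx]
      simp only [pvFF, hc, if_pos, ih]
    · have hc : d.contains x = false := by
        by_contra h
        exact hx ((PySem.Dict.contains_iff_mem_keys d x).mp (by simpa using h))
      rw [if_neg hx]
      simp only [pvFF, hc]
      rw [if_neg (by simp)]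
      rw [ih]
      rw [PySem.Dict.items_insert_of_not_contains _ _ hc,
          PySem.Dict.keys_insert_of_not_contains _ _ hc,
          PySem.Set.add_of_not_mem hx]
      simp

theorem pv_lfold_get?_not_mem : ∀ (l : List Int) (s : Int) (d : PySem.Dict Int Int) (v : Int),
    v ∉ l → ((PySem.List.enumerate l s).foldl pvLF d).get? v = d.get? v := by
  intro l
  induction l with
  | nil => intro s d v _; simp [PySem.List.enumerate_nil]
  | cons x t ih =>
    intro s d v hv
    rw [PySem.List.enumerate_cons]
    simp only [List.foldl_cons]
    rw [ih _ _ _ (fun h => hv (List.mem_cons_of_mem _ h))]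
    exact PySem.Dict.get?_insert_of_ne _ _ (fun h => hv (by simp [h]))
theorem pv_lfold_get?_mem : ∀ (l : List Int) (s : Int) (d : PySem.Dict Int Int) (v : Int),
    v ∈ l → ∃ j, ((PySem.List.enumerate l s).foldl pvLF d).get? v = some j
      ∧ s ≤ j ∧ j < s + l.length := by
  intro l
  induction l with
  | nil => intro s d v hv; simp at hv
  | cons x t ih =>
    intro s d v hv
    rw [PySem.List.enumerate_cons]
    simp only [List.foldl_cons, List.length_cons, Nat.cast_add, Nat.cast_one]
    by_cases hvt : v ∈ t
    · obtain ⟨j, hj, h1, h2⟩ := ih (s+1) (pvLF d (s, x)) v hvt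
      exact ⟨j, hj, by omega, by omega⟩
    · have hvx : v = x := by rcases List.mem_cons.mp hv with h | h; exact h; exact absurd h hvt
      refine ⟨s, ?_, le_refl s, by omega⟩
      rw [pv_lfold_get?_not_mem t (s+1) _ v hvt]
      subst hvx
      exact PySem.Dict.get?_insert_self _ _ _

theorem pv_lfold_keys (l : List Int) (s : Int) :
    ((PySem.List.enumerate l s).foldl pvLF PySem.Dict.empty).keys = PySem.Set.ofList l := by
  have h := PySem.Dict.keys_foldl_insert_key (PySem.List.enumerate l s) (fun p => p.2)
      (fun _ p => p.1) PySem.Dict.empty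
  rw [show (List.foldl pvLF PySem.Dict.empty (PySem.List.enumerate l s))
        = List.foldl (fun (d : PySem.Dict Int Int) (x : Int × Int) => d.insert x.2 x.1)
            PySem.Dict.empty (PySem.List.enumerate l s) from rfl,
      h, PySem.Dict.keys_empty, PySem.List.map_snd_enumerate]
  exact PySem.Set.update_empty l
theorem pv_len_eq {l1 l2 : List Int} (h1 : l1.Nodup) (h2 : l2.Nodup)
    (h : ∀ a, a ∈ l1 ↔ a ∈ l2) : l1.length = l2.length :=
  ((List.perm_ext_iff_of_nodup h1 h2).mpr h).length_eq

theorem pv_ofList_filter_len (l : List Int) (p : Int → Bool) :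
    (PySem.Set.ofList (l.filter p)).length = (PySem.Set.ofList l).countP p := by
  rw [List.countP_eq_length_filter]
  refine pv_len_eq (PySem.Set.nodup_ofList _) ((PySem.Set.nodup_ofList l).filter p) ?_
  intro a
  simp [PySem.Set.mem_ofList, List.mem_filter]

theorem pv_right_count (arr : List Int) (x i : Int) (h0 : 0 ≤ i) (hle : i.toNat ≤ arr.length) :
    ((PySem.List.enumerate arr 0).foldl pvLF PySem.Dict.empty).items.countP
        (fun r => decide (i ≤ r.2) && decide (r.1 < x))
      = (PySem.Set.ofList (arr.drop i.toNat)).countP (fun u => decide (u < x)) := by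
  have hkeys := pv_lfold_keys arr 0
  have hnd : ((PySem.List.enumerate arr 0).foldl pvLF PySem.Dict.empty).keys.Nodup := by
    rw [hkeys]; exact PySem.Set.nodup_ofList arr
  have hlen : ((arr.take i.toNat).length : Int) = i := by
    rw [List.length_take, Nat.min_eq_left hle]
    exact Int.toNat_of_nonneg h0
  have hsplit : ((PySem.List.enumerate arr 0).foldl pvLF PySem.Dict.empty)
      = (PySem.List.enumerate (arr.drop i.toNat) (0 + ((arr.take i.toNat).length : Int))).foldl pvLF
          ((PySem.List.enumerate (arr.take i.toNat) 0).foldl pvLF PySem.Dict.empty) := by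
    conv_lhs => rw [← List.take_append_drop i.toNat arr]
    rw [PySem.List.enumerate_append, List.foldl_append]
  rw [PySem.Dict.items_eq_map_keys _ hnd 0, List.countP_map]
  have hpt : ∀ u ∈ ((PySem.List.enumerate arr 0).foldl pvLF PySem.Dict.empty).keys,
      ((fun (r : Int × Int) => decide (i ≤ r.2) && decide (r.1 < x)) ∘
        (fun k => (k, ((PySem.List.enumerate arr 0).foldl pvLF PySem.Dict.empty).getD k 0))) u
      = (decide (u ∈ arr.drop i.toNat) && decide (u < x)) := by
    intro u hu
    rw [hkeys, PySem.Set.mem_ofList] at hu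
    by_cases hd : u ∈ arr.drop i.toNat
    · obtain ⟨j, hj, h1, _⟩ := pv_lfold_get?_mem (arr.drop i.toNat)
        (0 + ((arr.take i.toNat).length : Int))
        ((PySem.List.enumerate (arr.take i.toNat) 0).foldl pvLF PySem.Dict.empty) u hd
      rw [← hsplit] at hj
      simp only [Function.comp_apply, PySem.Dict.getD_eq_get?_getD, hj, Option.getD_some, hd,
        decide_true, Bool.true_and]
      have : i ≤ j := by omega
      simp [this]
    · have hu_take : u ∈ arr.take i.toNat := by
        have := List.take_append_drop i.toNat arr
        rw [← this] at hu
        rcases List.mem_append.mp hu with h | h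
        · exact h
        · exact absurd h hd
      obtain ⟨j, hj, h1, h2⟩ := pv_lfold_get?_mem (arr.take i.toNat) 0 PySem.Dict.empty u hu_take
      have hget : ((PySem.List.enumerate arr 0).foldl pvLF PySem.Dict.empty).get? u = some j := by
        rw [hsplit, pv_lfold_get?_not_mem _ _ _ _ hd]
        exact hj
      simp only [Function.comp_apply, PySem.Dict.getD_eq_get?_getD, hget, Option.getD_some, hd,
        decide_false, Bool.false_and]
      have : ¬ (i ≤ j) := by omega
      simp [this]
  rw [List.countP_congr (q := fun u => decide (u ∈ arr.drop i.toNat) && decide (u < x))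
        (fun a ha => by rw [hpt a ha]), hkeys]
  rw [List.countP_eq_length_filter, List.countP_eq_length_filter]
  refine pv_len_eq ((PySem.Set.nodup_ofList arr).filter _) ((PySem.Set.nodup_ofList _).filter _) ?_
  intro a
  simp only [List.mem_filter, PySem.Set.mem_ofList, Bool.and_eq_true, decide_eq_true_eq]
  constructor
  · rintro ⟨_, hd, hx⟩; exact ⟨hd, by simp [hx]⟩
  · rintro ⟨hd, hx⟩
    exact ⟨List.drop_subset _ _ hd, by simpa using ⟨hd, by simpa using hx⟩⟩
theorem pv_left_count (arr : List Int) (x i : Int) (h0 : 0 ≤ i) (hle : i.toNat ≤ arr.length) :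
    (pvFirsts PySem.Set.empty arr 0).countP (fun r => decide (r.2 < i) && decide (x < r.1))
      = (PySem.Set.ofList (arr.take i.toNat)).countP (fun u => decide (x < u)) := by
  have hlen : ((arr.take i.toNat).length : Int) = i := by
    rw [List.length_take, Nat.min_eq_left hle]
    exact Int.toNat_of_nonneg h0
  have hsplit : pvFirsts PySem.Set.empty arr 0
      = pvFirsts PySem.Set.empty (arr.take i.toNat) 0
        ++ pvFirsts (PySem.Set.update PySem.Set.empty (arr.take i.toNat)) (arr.drop i.toNat)
             (0 + ((arr.take i.toNat).length : Int)) := by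
    conv_lhs => rw [← List.take_append_drop i.toNat arr]
    exact pvFirsts_append (arr.take i.toNat) PySem.Set.empty 0 (arr.drop i.toNat)
  rw [hsplit, List.countP_append]
  have h2 : (pvFirsts (PySem.Set.update PySem.Set.empty (arr.take i.toNat)) (arr.drop i.toNat)
      (0 + ((arr.take i.toNat).length : Int))).countP
      (fun r => decide (r.2 < i) && decide (x < r.1)) = 0 := by
    rw [List.countP_eq_zero]
    intro q hq
    have hb := (pvFirsts_bounds _ _ _ q hq).1
    have : ¬ (q.2 < i) := by omega
    simp [this]
  rw [h2, Nat.add_zero]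
  have h1 : ∀ q ∈ pvFirsts PySem.Set.empty (arr.take i.toNat) 0,
      (decide (q.2 < i) && decide (x < q.1)) = true ↔ (decide (x < q.1) : Bool) = true := by
    intro q hq
    have hb := (pvFirsts_bounds _ _ _ q hq).2
    rw [hlen] at hb
    have : q.2 < i := by omega
    simp [this]
  rw [List.countP_congr (q := fun r => decide (x < r.1)) h1]
  have hmap := pvFirsts_map_fst (arr.take i.toNat) PySem.Set.empty 0
  have : (pvFirsts PySem.Set.empty (arr.take i.toNat) 0).countP (fun r => decide (x < r.1))
      = ((pvFirsts PySem.Set.empty (arr.take i.toNat) 0).map (·.1)).countP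
          (fun u => decide (x < u)) := by
    rw [List.countP_map]; rfl
  rw [this, hmap]
  have hupd : PySem.Set.update PySem.Set.empty (arr.take i.toNat)
      = PySem.Set.ofList (arr.take i.toNat) := PySem.Set.update_empty _
  rw [hupd]
  rfl
def pvStep (pre t : List Int) (x : Int) : Int :=
  ((PySem.Set.ofList (pre.filter (fun u => decide (x < u)))).length : Int)
  * ((PySem.Set.ofList ((x :: t).filter (fun u => decide (u < x)))).length : Int)

def pvSpec : List Int → List Int → Int
  | _, [] => 0
  | pre, x :: t => (if x ∈ pre then (0:Int) else pvStep pre t x) + pvSpec (pre ++ [x]) t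

theorem pv_sum_firsts (arr : List Int) : ∀ (suf pre : List Int), arr = pre ++ suf →
    ((pvFirsts (PySem.Set.ofList pre) suf (pre.length : Int)).map
        (fun q => ((PySem.Set.ofList (arr.take q.2.toNat)).countP (fun u => decide (q.1 < u)) : Int)
                * ((PySem.Set.ofList (arr.drop q.2.toNat)).countP (fun u => decide (u < q.1)) : Int))).sum
      = pvSpec pre suf := by
  intro suf
  induction suf with
  | nil => intro pre _; simp [pvFirsts, pvSpec]
  | cons x t ih =>
    intro pre harr
    have hcast : ((pre.length : Int)) + 1 = (((pre ++ [x]).length : Int)) := by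
      push_cast [List.length_append]; simp
    simp only [pvFirsts, pvSpec]
    by_cases hx : x ∈ pre
    · rw [if_pos ((PySem.Set.mem_ofList _ _).mpr hx), if_pos hx]
      have hseen : PySem.Set.ofList pre = PySem.Set.ofList (pre ++ [x]) := by
        rw [PySem.Set.ofList_append_singleton,
            PySem.Set.add_of_mem ((PySem.Set.mem_ofList _ _).mpr hx)]
      rw [hseen, hcast, ih (pre ++ [x]) (by simpa using harr)]
      ring
    · rw [if_neg (fun h => hx ((PySem.Set.mem_ofList _ _).mp h)), if_neg hx]
      rw [List.map_cons, List.sum_cons]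
      have hseen : PySem.Set.add (PySem.Set.ofList pre) x = PySem.Set.ofList (pre ++ [x]) :=
        (PySem.Set.ofList_append_singleton pre x).symm
      rw [hseen, hcast, ih (pre ++ [x]) (by simpa using harr)]
      congr 1
      have htn : ((pre.length : Int)).toNat = pre.length := Int.toNat_natCast _
      have htake : arr.take ((pre.length : Int)).toNat = pre := by
        rw [htn, harr, List.take_left]
      have hdrop : arr.drop ((pre.length : Int)).toNat = x :: t := by
        rw [htn, harr, List.drop_left]
      simp only [htake, hdrop, pvStep]
      rw [pv_ofList_filter_len, pv_ofList_filter_len]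
def pvGA (arr : List Int) (st : PySem.Dict Int Bool × Int) (p : Int × Int) :
    PySem.Dict Int Bool × Int :=
  if st.1.get? p.2 = none then
    (st.1.insert p.2 true,
     st.2 + (((PySem.Set.ofList ((PySem.List.slice arr none (some p.1)).filter (fun x => decide (p.2 < x)))).length : Int)
          * ((PySem.Set.ofList ((PySem.List.slice arr (some p.1) none).filter (fun x => decide (x < p.2)))).length : Int)))
  else st

theorem pv_A_loop (arr : List Int) : ∀ (suf pre : List Int) (dd : PySem.Dict Int Bool) (ans : Int),
    arr = pre ++ suf → dd.keys = PySem.Set.ofList pre →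
    ((PySem.List.enumerate suf (pre.length : Int)).foldl (pvGA arr) (dd, ans)).2
      = ans + pvSpec pre suf := by
  intro suf
  induction suf with
  | nil => intro pre dd ans _ _; simp [PySem.List.enumerate_nil, pvSpec]
  | cons x t ih =>
    intro pre dd ans harr hkeys
    have hcast : ((pre.length : Int)) + 1 = (((pre ++ [x]).length : Int)) := by
      push_cast [List.length_append]; simp
    rw [PySem.List.enumerate_cons]
    simp only [List.foldl_cons, pvSpec]
    by_cases hx : x ∈ pre
    · have hg : dd.get? x ≠ none := by
        simp only [ne_eq, PySem.Dict.get?_eq_none_iff_not_mem_keys, hkeys]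
        simp [PySem.Set.mem_ofList, hx]
      have hbody : pvGA arr (dd, ans) ((pre.length : Int), x) = (dd, ans) := by
        simp only [pvGA]
        rw [if_neg (by simpa using hg)]
      rw [hbody, hcast,
          ih (pre ++ [x]) dd ans (by simpa using harr)
            (by rw [hkeys, PySem.Set.ofList_append_singleton,
                    PySem.Set.add_of_mem ((PySem.Set.mem_ofList _ _).mpr hx)]),
          if_pos hx]
      ring
    · have hg : dd.get? x = none := by
        rw [PySem.Dict.get?_eq_none_iff_not_mem_keys, hkeys]
        simp [PySem.Set.mem_ofList _ _, hx]
      have htake : PySem.List.slice arr none (some (pre.length : Int)) = pre := by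
        rw [PySem.List.slice_to_natCast, harr, List.take_left]
      have hdrop : PySem.List.slice arr (some (pre.length : Int)) none = x :: t := by
        rw [PySem.List.slice_from_natCast, harr, List.drop_left]
      have hbody : pvGA arr (dd, ans) ((pre.length : Int), x)
          = (dd.insert x true, ans + pvStep pre t x) := by
        simp only [pvGA]
        rw [if_pos (by simpa using hg), htake, hdrop]
        rfl
      have hcontains : dd.contains x = false := by
        by_contra h
        have := (PySem.Dict.contains_iff_mem_keys dd x).mp (by simpa using h)
        rw [hkeys, PySem.Set.mem_ofList] at this
        exact hx this
      rw [hbody, hcast,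
          ih (pre ++ [x]) (dd.insert x true) (ans + pvStep pre t x) (by simpa using harr)
            (by rw [PySem.Dict.keys_insert_of_not_contains _ _ hcontains, hkeys,
                    PySem.Set.ofList_append_singleton,
                    PySem.Set.add_of_not_mem (fun h => hx ((PySem.Set.mem_ofList _ _).mp h))]),
          if_neg hx]
      ring
theorem pv_A_eq_spec (arr : List Int) : inversion arr = pvSpec [] arr := by
  have hb : inversion arr = ((PySem.List.enumerate arr 0).foldl (pvGA arr) (PySem.Dict.empty, 0)).2 := by
    unfold inversion
    rw [PySem.List.enumerate_eq_map_pyRange arr 0, List.foldl_map]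
    rfl
  rw [hb]
  have h := pv_A_loop arr arr [] PySem.Dict.empty 0 rfl (by rw [PySem.Dict.keys_empty]; rfl)
  simpa using h

def pvBF (s : PySem.Dict Int Int × PySem.Dict Int Int) (p : Int × Int) :
    PySem.Dict Int Int × PySem.Dict Int Int := (pvFF s.1 p, pvLF s.2 p)

theorem pv_B_eq_spec (arr : List Int) : inversion_alt arr = pvSpec [] arr := by
  have h1 : inversion_alt arr =
      ((PySem.List.enumerate arr 0).foldl pvBF (PySem.Dict.empty, PySem.Dict.empty)).1.items.foldl
        (fun ans q => ans +
          ((((PySem.List.enumerate arr 0).foldl pvBF (PySem.Dict.empty, PySem.Dict.empty)).1.items.countP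
              (fun r => decide (r.2 < q.2) && decide (q.1 < r.1)) : Int)
          * (((PySem.List.enumerate arr 0).foldl pvBF (PySem.Dict.empty, PySem.Dict.empty)).2.items.countP
              (fun r => decide (q.2 ≤ r.2) && decide (r.1 < q.1)) : Int)))
        0 := rfl
  have h2 : (PySem.List.enumerate arr 0).foldl pvBF (PySem.Dict.empty, PySem.Dict.empty)
      = ((PySem.List.enumerate arr 0).foldl pvFF PySem.Dict.empty,
         (PySem.List.enumerate arr 0).foldl pvLF PySem.Dict.empty) :=
    PySem.List.foldl_prod_mk pvFF pvLF (PySem.List.enumerate arr 0) PySem.Dict.empty PySem.Dict.empty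
  rw [h1, h2]
  dsimp only
  have h3 := PySem.List.foldl_add
    (((PySem.List.enumerate arr 0).foldl pvFF PySem.Dict.empty).items)
    (fun (q : Int × Int) =>
        ((((PySem.List.enumerate arr 0).foldl pvFF PySem.Dict.empty).items.countP
            (fun r => decide (r.2 < q.2) && decide (q.1 < r.1)) : Int))
      * ((((PySem.List.enumerate arr 0).foldl pvLF PySem.Dict.empty).items.countP
            (fun r => decide (q.2 ≤ r.2) && decide (r.1 < q.1)) : Int))) 0
  rw [h3]
  have hitems : ((PySem.List.enumerate arr 0).foldl pvFF PySem.Dict.empty).items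
      = pvFirsts PySem.Set.empty arr 0 := by
    rw [pv_ffold_items arr 0 PySem.Dict.empty, PySem.Dict.keys_empty]
    rfl
  rw [hitems]
  rw [List.map_congr_left (l := pvFirsts PySem.Set.empty arr 0)
    (g := fun q => ((PySem.Set.ofList (arr.take q.2.toNat)).countP (fun u => decide (q.1 < u)) : Int)
                 * ((PySem.Set.ofList (arr.drop q.2.toNat)).countP (fun u => decide (u < q.1)) : Int))
    (by
      intro q hq
      have hb := pvFirsts_bounds arr PySem.Set.empty 0 q hq
      have h0 : 0 ≤ q.2 := by omega
      have hle : q.2.toNat ≤ arr.length := by omega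
      rw [pv_left_count arr q.1 q.2 h0 hle, pv_right_count arr q.1 q.2 h0 hle])]
  have hsum := pv_sum_firsts arr arr [] rfl
  simp only [List.length_nil, Nat.cast_zero] at hsum
  rw [show PySem.Set.ofList ([] : List Int) = PySem.Set.empty from rfl] at hsum
  rw [hsum]
  simp

-- ===== VERDICT (by name: the statement is the Claim_ definition above) =====
theorem inversion_spec : Claim_equal_inversion := by
  intro arr _
  unfold Spec_inversion
  rw [pv_A_eq_spec, pv_B_eq_spec]
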